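-- pv_equiv track=rewrite | github.com/l52w/programmers | 프로그래머스/lv0/120903. 배열의 유사도/배열의 유사도.py | solution
-- ===== SOURCE A (Python) =====
-- def solution(s1, s2):
--     answer = 0
--     for i in range(len(s1)):
--         for j in range(len(s2)) :
--             x,y = s1[i],s2[j]
--             if x == y :
--                 answer += 1
--     return answer
-- ===== SOURCE B (Python) =====
-- def solution(s1, s2):
--     c1 = {}
--     for x in s1:
--         c1[x] = c1.get(x, 0) + 1
--     c2 = {}
--     for y in s2:
--         c2[y] = c2.get(y, 0) + 1
--     answer = 0
--     for v, k in c1.items():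
--         if v in c2:
--             answer += k * c2[v]
--     return answer
-- ===== Notes on version B (the rewrite author's own statement) =====
-- stated objective: faster
-- what changed: Replaced the quadratic nested index loops with two hash-map frequency counters built in one pass each, summing count1[v]*count2[v] over shared values.
import Mathlib
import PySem

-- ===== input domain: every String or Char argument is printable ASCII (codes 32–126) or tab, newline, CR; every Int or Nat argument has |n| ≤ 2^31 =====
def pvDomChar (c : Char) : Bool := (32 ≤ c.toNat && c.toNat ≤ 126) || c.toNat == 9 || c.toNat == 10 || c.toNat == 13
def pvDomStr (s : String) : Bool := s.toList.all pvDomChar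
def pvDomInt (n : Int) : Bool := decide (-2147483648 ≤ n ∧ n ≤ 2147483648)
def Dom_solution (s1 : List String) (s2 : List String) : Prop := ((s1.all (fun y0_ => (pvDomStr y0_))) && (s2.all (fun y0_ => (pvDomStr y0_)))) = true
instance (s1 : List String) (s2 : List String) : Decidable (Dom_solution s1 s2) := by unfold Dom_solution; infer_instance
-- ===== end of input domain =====

-- B replaces A's nested index loops by two one-pass frequency counters and a sum of count products (faster).

-- ===== PORT A =====
def solution (s1 : List String) (s2 : List String) : Int :=
  (PySem.List.pyRange 0 (PySem.List.len s1) 1).foldl (fun answer i =>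
    (PySem.List.pyRange 0 (PySem.List.len s2) 1).foldl (fun answer j =>
      let x := PySem.List.pyGetD s1 i ""
      let y := PySem.List.pyGetD s2 j ""
      if x == y then answer + 1 else answer) answer) 0

-- ===== PORT B =====
def solution_alt (s1 : List String) (s2 : List String) : Int :=
  let c1 := s1.foldl (fun d x => d.insert x (d.getD x 0 + 1)) (PySem.Dict.empty : PySem.Dict String Int)
  let c2 := s2.foldl (fun d y => d.insert y (d.getD y 0 + 1)) (PySem.Dict.empty : PySem.Dict String Int)
  c1.items.foldl (fun answer p => if c2.contains p.1 then answer + p.2 * c2.getD p.1 0 else answer) 0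

-- ===== PRECONDITION & SPEC =====
def Spec_solution (s1 : List String) (s2 : List String) (out : Int) : Prop := out = solution_alt s1 s2
instance (s1 : List String) (s2 : List String) (out : Int) : Decidable (Spec_solution s1 s2 out) := by unfold Spec_solution; infer_instance

-- ===== CLAIM (what is proved, stated in full; the proofs are below) =====
def Claim_equal_solution : Prop := ∀ (s1 : List String) (s2 : List String), Dom_solution s1 s2 → Spec_solution s1 s2 (solution s1 s2)

-- ===== LEMMAS AND PROOFS =====

-- A's inner loop counts the occurrences of x in s2.
theorem inner_loop_eq (x : String) (s2 : List String) (a : Int) :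
    (PySem.List.pyRange 0 (PySem.List.len s2) 1).foldl
      (fun answer j =>
        let xx := x
        let y := PySem.List.pyGetD s2 j ""
        if xx == y then answer + 1 else answer) a
    = a + (s2.count x : Int) := by
  rw [PySem.List.foldl_pyRange_zero_pyGetD s2 "" (fun answer y => if x == y then answer + 1 else answer) a]
  rw [PySem.List.foldl_if_add_one]
  congr 2
  refine List.countP_congr (fun y _ => ?_)
  simp only [beq_iff_eq]
  exact eq_comm

-- A is the sum over x ∈ s1 of the number of occurrences of x in s2.
theorem solution_eq_sum (s1 s2 : List String) :
    solution s1 s2 = (s1.map (fun x => (s2.count x : Int))).sum := by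
  unfold solution
  rw [PySem.List.foldl_pyRange_zero_pyGetD s1 ""
    (fun answer x =>
      (PySem.List.pyRange 0 (PySem.List.len s2) 1).foldl
        (fun answer j =>
          let xx := x
          let y := PySem.List.pyGetD s2 j ""
          if xx == y then answer + 1 else answer) answer) 0]
  rw [PySem.List.foldl_congr_mem' s1 _ (fun answer x => answer + (s2.count x : Int)) 0
    (fun x _ answer => inner_loop_eq x s2 answer)]
  rw [PySem.List.foldl_add]
  simp

-- a guarded accumulation is the sum of the guarded terms
theorem foldl_guard_add {α : Type} (l : List α) (p : α → Bool) (g : α → Int) (a : Int) :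
    l.foldl (fun answer v => if p v then answer + g v else answer) a
      = a + (l.map (fun v => if p v then g v else 0)).sum := by
  induction l generalizing a with
  | nil => simp
  | cons h t ih => simp only [List.foldl_cons, List.map_cons, List.sum_cons, ih]; split_ifs <;> ring

-- B is the sum over the distinct values v of s1 of count1(v) * count2(v), guarded by v ∈ s2.
theorem solution_alt_eq_sum (s1 s2 : List String) :
    solution_alt s1 s2
      = ((PySem.Set.ofList s1).map
          (fun v => if s2.contains v then (s1.count v : Int) * (s2.count v : Int) else 0)).sum := by
  unfold solution_alt
  rw [PySem.Dict.foldl_insert_getD_add_one_eq_counter, PySem.Dict.foldl_insert_getD_add_one_eq_counter]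
  dsimp only
  rw [PySem.Dict.items_counter, List.foldl_map]
  simp only [PySem.Dict.contains_counter, PySem.Dict.getD_counter]
  rw [foldl_guard_add]
  simp

-- the guard is redundant: count2(v) = 0 when v ∉ s2
theorem guard_redundant (s1 s2 : List String) :
    ((PySem.Set.ofList s1).map
        (fun v => if s2.contains v then (s1.count v : Int) * (s2.count v : Int) else 0)).sum
      = ((PySem.Set.ofList s1).map (fun v => (s1.count v : Int) * (s2.count v : Int))).sum := by
  refine congrArg List.sum (List.map_congr_left (fun v _ => ?_))
  split_ifs with h
  · rfl
  · have : s2.count v = 0 := List.count_eq_zero.mpr (by simpa using h)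
    simp [this]

-- the combinatorial core: grouping a sum over s1 by distinct values
theorem sum_group_by_count (s1 s2 : List String) :
    (s1.map (fun x => (s2.count x : Int))).sum
      = ((PySem.Set.ofList s1).map (fun v => (s1.count v : Int) * (s2.count v : Int))).sum := by
  rw [Finset.sum_list_map_count s1 (fun x => (s2.count x : Int))]
  have hnd : (PySem.List.dedup s1).Nodup := PySem.List.nodup_dedup s1
  rw [PySem.List.dedup_eq_ofList] at hnd
  have hfs : (PySem.Set.ofList s1 : List String).toFinset = s1.toFinset := by
    ext v
    simp
  rw [← List.sum_toFinset _ hnd, hfs]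
  refine Finset.sum_congr rfl (fun v _ => ?_)
  simp

-- ===== VERDICT (by name: the statement is the Claim_ definition above) =====
theorem solution_spec : Claim_equal_solution := by
  intro s1 s2 _
  show solution s1 s2 = solution_alt s1 s2
  rw [solution_eq_sum, solution_alt_eq_sum, guard_redundant, sum_group_by_count]
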